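-- pv_equiv track=rewrite | github.com/m1sterzer0/JuliaAtcoder | python/abc200_209/abc203_D.py | solve
-- ===== SOURCE A (Python) =====
-- def solve(N,K,A) :
--     lim = K*K // 2 + (0 if K%2==0 else 1)
--     l = -1; u = 10**9+1
--     dp = [[0]*N for i in range(N)]
--     u = max(max(A[i]) for i in range(N))
--     l = min(min(A[i]) for i in range(N)) - 1
--     while (u-l) > 1 :
--         m = (u+l)//2
--         dp[0][0] = 1 if A[0][0] <= m else 0
--         for i in range(1,N) : dp[0][i] = dp[0][i-1] + (1 if A[0][i] <= m else 0)
--         for i in range(1,N) : dp[i][0] = dp[i-1][0] + (1 if A[i][0] <= m else 0)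
--         for i in range(1,N) :
--             for j in range(1,N) :
--                 dp[i][j] = (1 if A[i][j] <= m else 0) + dp[i-1][j] + dp[i][j-1] - dp[i-1][j-1]
--         good = False
--         for i in range(N-K+1) :
--             for j in range(N-K+1) :
--                 targ = dp[i+K-1][j+K-1] - (0 if i == 0 else dp[i-1][j+K-1]) - (0 if j == 0 else dp[i+K-1][j-1]) + (0 if i == 0 or j == 0 else dp[i-1][j-1])
--                 if targ >= lim : good = True; break
--             if good :  break
--         if good :
--             u = m
--         else :
--             l = m
--     return u
-- ===== SOURCE B (Python) =====
-- def solve(N, K, A):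
--     # Alternative: same binary search bounds, but each KxK window is counted
--     # directly by a double sum instead of building a 2D prefix-sum table.
--     lim = (K * K + 1) // 2
--     u = max(max(A[i]) for i in range(N))
--     l = min(min(A[i]) for i in range(N)) - 1
--     while u - l > 1:
--         m = (u + l) // 2
--         good = any(
--             sum(sum(1 if A[a][b] <= m else 0 for b in range(j, j + K))
--                 for a in range(i, i + K)) >= lim
--             for i in range(N - K + 1) for j in range(N - K + 1)
--         )
--         if good:
--             u = m
--         else:
--             l = m
--     return u
-- ===== Notes on version B (the rewrite author's own statement) =====
-- stated objective: simpler
-- what changed: Inside the same binary search over candidate medians, B drops A's 2D prefix-sum table and its inclusion-exclusion window formula and instead counts the entries <= m of each KxK window directly with a double sum inside any(...) over the windows.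
-- outside the precondition, e.g. on solve(2, -1, [[-1, 0], [3, 2]]): A returns -1, B returns 3
import Mathlib
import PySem

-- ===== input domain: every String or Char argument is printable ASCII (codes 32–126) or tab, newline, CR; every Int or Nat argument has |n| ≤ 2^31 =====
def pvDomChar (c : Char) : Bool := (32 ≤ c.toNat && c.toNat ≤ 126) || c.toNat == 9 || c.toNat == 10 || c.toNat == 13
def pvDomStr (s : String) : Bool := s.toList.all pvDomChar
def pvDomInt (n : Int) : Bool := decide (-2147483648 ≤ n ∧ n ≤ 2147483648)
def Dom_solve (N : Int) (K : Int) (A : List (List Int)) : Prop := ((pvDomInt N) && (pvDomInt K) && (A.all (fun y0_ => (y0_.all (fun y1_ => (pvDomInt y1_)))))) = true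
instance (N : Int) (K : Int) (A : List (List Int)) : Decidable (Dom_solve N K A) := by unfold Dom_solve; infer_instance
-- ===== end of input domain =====

-- B replaces A's 2D prefix-sum table + inclusion-exclusion by a direct double-sum count of each
-- K×K window inside the same binary search (objective: simpler; B is not faster).

-- shared indexing helper: x[i][j] (Python chained indexing, totalised with defaults; in-range under Pre_)
def pvGetM (d : List (List Int)) (i j : Int) : Int :=
  PySem.List.pyGetD (PySem.List.pyGetD d i []) j 0

-- ===== PORT A =====
-- d[i][j] = v  (replaces row i by the updated row; exact for the in-range nonnegative i, j used here)
def pvSetM (d : List (List Int)) (i j v : Int) : List (List Int) :=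
  PySem.List.pySetD d i (PySem.List.pySetD (PySem.List.pyGetD d i []) j v)

-- loop bodies of the four dp-filling loops of A's while-body, in source order
def topStep (A : List (List Int)) (m : Int) (e : List (List Int)) (i : Int) : List (List Int) :=
  pvSetM e 0 i (pvGetM e 0 (i-1) + (if pvGetM A 0 i ≤ m then 1 else 0))
def colStep (A : List (List Int)) (m : Int) (e : List (List Int)) (i : Int) : List (List Int) :=
  pvSetM e i 0 (pvGetM e (i-1) 0 + (if pvGetM A i 0 ≤ m then 1 else 0))
def cellStep (A : List (List Int)) (m i : Int) (e : List (List Int)) (j : Int) : List (List Int) :=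
  pvSetM e i j ((if pvGetM A i j ≤ m then 1 else 0)
    + pvGetM e (i-1) j + pvGetM e i (j-1) - pvGetM e (i-1) (j-1))

-- dp is threaded as state (Python mutates a single dp in place; every cell is overwritten)
def fillA (A : List (List Int)) (N m : Int) (d : List (List Int)) : List (List Int) :=
  (PySem.List.pyRange 1 N).foldl (fun e i => (PySem.List.pyRange 1 N).foldl (cellStep A m i) e)
    ((PySem.List.pyRange 1 N).foldl (colStep A m)
      ((PySem.List.pyRange 1 N).foldl (topStep A m)
        (pvSetM d 0 0 (if pvGetM A 0 0 ≤ m then 1 else 0))))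

-- A's window scan with early break (the boolean accumulator models Python's break)
def goodA (N K lim : Int) (d : List (List Int)) : Bool :=
  (PySem.List.pyRange 0 (N-K+1)).foldl (fun g i =>
    if g then g else
      (PySem.List.pyRange 0 (N-K+1)).foldl (fun g2 j =>
        if g2 then g2 else
          decide (pvGetM d (i+K-1) (j+K-1)
            - (if i = 0 then 0 else pvGetM d (i-1) (j+K-1))
            - (if j = 0 then 0 else pvGetM d (i+K-1) (j-1))
            + (if i = 0 ∨ j = 0 then 0 else pvGetM d (i-1) (j-1)) ≥ lim)) g) false

-- A's while loop
def loopA (N K lim : Int) (A : List (List Int)) (d : List (List Int)) (l u : Int) : Int :=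
  if _h : 1 < u - l then
    let m := PySem.Int.floordiv (u + l) 2
    let d' := fillA A N m d
    if goodA N K lim d' then loopA N K lim A d' l m else loopA N K lim A d' m u
  else u
termination_by (u - l).toNat
decreasing_by
  all_goals
    rw [PySem.Int.floordiv_eq_ediv_of_pos (by norm_num : (0:Int) < 2)]
    omega

def solve (N : Int) (K : Int) (A : List (List Int)) : Int :=
  let lim := PySem.Int.floordiv (K*K) 2 + (if PySem.Int.mod K 2 = 0 then (0:Int) else 1)
  let d := List.replicate N.toNat (List.replicate N.toNat (0:Int))
  -- Python max()/min() raise on an empty argument; the `.getD 0` totalisation is exact under Pre_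
  let u := (PySem.List.max? ((PySem.List.pyRange 0 N).map
    (fun i => (PySem.List.max? (PySem.List.pyGetD A i []) (fun x => x)).getD 0)) (fun x => x)).getD 0
  let l := (PySem.List.min? ((PySem.List.pyRange 0 N).map
    (fun i => (PySem.List.min? (PySem.List.pyGetD A i []) (fun x => x)).getD 0)) (fun x => x)).getD 0 - 1
  loopA N K lim A d l u

-- ===== PORT B =====
-- direct count of the entries ≤ m in the K×K window whose top-left corner is (i, j)
def countB (A : List (List Int)) (K m i j : Int) : Int :=
  ((PySem.List.pyRange i (i+K)).map (fun a =>
    ((PySem.List.pyRange j (j+K)).map (fun b => if pvGetM A a b ≤ m then (1:Int) else 0)).sum)).sum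

def goodB (N K lim : Int) (A : List (List Int)) (m : Int) : Bool :=
  (PySem.List.pyRange 0 (N-K+1)).any (fun i =>
    (PySem.List.pyRange 0 (N-K+1)).any (fun j => decide (countB A K m i j ≥ lim)))

def loopB (N K lim : Int) (A : List (List Int)) (l u : Int) : Int :=
  if _h : 1 < u - l then
    let m := PySem.Int.floordiv (u + l) 2
    if goodB N K lim A m then loopB N K lim A l m else loopB N K lim A m u
  else u
termination_by (u - l).toNat
decreasing_by
  all_goals
    rw [PySem.Int.floordiv_eq_ediv_of_pos (by norm_num : (0:Int) < 2)]
    omega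

def solve_alt (N : Int) (K : Int) (A : List (List Int)) : Int :=
  let lim := PySem.Int.floordiv (K*K + 1) 2
  -- max()/min() raise on an empty argument; the `.getD 0` totalisation is exact under Pre_
  let u := (PySem.List.max? ((PySem.List.pyRange 0 N).map
    (fun i => (PySem.List.max? (PySem.List.pyGetD A i []) (fun x => x)).getD 0)) (fun x => x)).getD 0
  let l := (PySem.List.min? ((PySem.List.pyRange 0 N).map
    (fun i => (PySem.List.min? (PySem.List.pyGetD A i []) (fun x => x)).getD 0)) (fun x => x)).getD 0 - 1
  loopB N K lim A l u

-- ===== PRECONDITION & SPEC =====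
-- Pre_ is the problem's natural domain: at least N rows of length ≥ N (N ≥ 1) and a window size
-- 0 ≤ K.  It excludes (a) K < 0, where A returns values produced by Python's negative-index
-- wraparound on dp (accidental), and (b) short inputs on which A raises (IndexError / empty max()).
def Pre_solve (N : Int) (K : Int) (A : List (List Int)) : Prop :=
  0 ≤ K ∧ 1 ≤ N ∧ N.toNat ≤ A.length ∧ ∀ r ∈ A.take N.toNat, N.toNat ≤ r.length
instance (N : Int) (K : Int) (A : List (List Int)) : Decidable (Pre_solve N K A) := by
  unfold Pre_solve; infer_instance

def pvWitness_solve : Int × Int × List (List Int) := (2, 1, [[1, 2], [3, 4]])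

def Spec_solve (N : Int) (K : Int) (A : List (List Int)) (out : Int) : Prop := out = solve_alt N K A
instance (N : Int) (K : Int) (A : List (List Int)) (out : Int) : Decidable (Spec_solve N K A out) := by
  unfold Spec_solve; infer_instance

-- ===== CLAIM (what is proved, stated in full; the proofs are below) =====
def Claim_equal_solve : Prop := ∀ (N : Int) (K : Int) (A : List (List Int)),
  Dom_solve N K A → Pre_solve N K A → Spec_solve N K A (solve N K A)

-- ===== LEMMAS AND PROOFS =====

-- spec-level counting: pvF = the 0/1 indicator, pvRowS a j = #{b ≤ j in row a}, pvS = 2D prefix count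
def pvF (A : List (List Int)) (m a b : Int) : Int := if pvGetM A a b ≤ m then 1 else 0

def pvRowS (A : List (List Int)) (m a j : Int) : Int :=
  ((PySem.List.pyRange 0 (j+1)).map (fun b => pvF A m a b)).sum

def pvS (A : List (List Int)) (m i j : Int) : Int :=
  ((PySem.List.pyRange 0 (i+1)).map (fun a => pvRowS A m a j)).sum

lemma pvRowS_neg (A : List (List Int)) (m a : Int) {j : Int} (h : j < 0) : pvRowS A m a j = 0 := by
  unfold pvRowS; rw [PySem.List.pyRange_one_eq_nil (by omega)]; rfl

lemma pvS_neg (A : List (List Int)) (m : Int) {i : Int} (j : Int) (h : i < 0) : pvS A m i j = 0 := by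
  unfold pvS; rw [PySem.List.pyRange_one_eq_nil (by omega)]; rfl

lemma pvS_colneg (A : List (List Int)) (m i : Int) {j : Int} (h : j < 0) : pvS A m i j = 0 := by
  have hz : ∀ a : Int, pvRowS A m a j = 0 := fun a => pvRowS_neg A m a h
  unfold pvS
  simp [hz]

lemma pvRowS_succ (A : List (List Int)) (m a : Int) {j : Int} (h : 0 ≤ j) :
    pvRowS A m a j = pvRowS A m a (j-1) + pvF A m a j := by
  unfold pvRowS
  rw [PySem.List.pyRange_one_succ_right (by omega : (0:Int) ≤ j)]
  have hj : j - 1 + 1 = j := by omega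
  rw [hj, List.map_append, List.sum_append]
  simp

lemma pvS_succ (A : List (List Int)) (m : Int) {i : Int} (j : Int) (h : 0 ≤ i) :
    pvS A m i j = pvS A m (i-1) j + pvRowS A m i j := by
  unfold pvS
  rw [PySem.List.pyRange_one_succ_right (by omega : (0:Int) ≤ i)]
  have hi : i - 1 + 1 = i := by omega
  rw [hi, List.map_append, List.sum_append]
  simp

lemma pvS_rec (A : List (List Int)) (m : Int) {i j : Int} (hi : 0 ≤ i) (hj : 0 ≤ j) :
    pvS A m i j = pvF A m i j + pvS A m (i-1) j + pvS A m i (j-1) - pvS A m (i-1) (j-1) := by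
  have h1 := pvS_succ A m j hi
  have h2 := pvS_succ A m (j-1) hi
  have h3 := pvRowS_succ A m i hj
  omega

lemma pvS_zero (A : List (List Int)) (m j : Int) : pvS A m 0 j = pvRowS A m 0 j := by
  unfold pvS
  rw [show (0:Int) + 1 = 0 + 1 from rfl, PySem.List.pyRange_one_singleton]
  simp

lemma pvRowS_zero (A : List (List Int)) (m a : Int) : pvRowS A m a 0 = pvF A m a 0 := by
  rw [pvRowS_succ A m a (by omega : (0:Int) ≤ 0), pvRowS_neg A m a (by omega : (0:Int)-1 < 0)]
  omega

lemma pv_sum_map_sub (xs : List Int) (f g : Int → Int) :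
    (xs.map (fun a => f a - g a)).sum = (xs.map f).sum - (xs.map g).sum := by
  induction xs with
  | nil => simp
  | cons x t ih => simp [ih]; ring

lemma countB_eq (A : List (List Int)) (K m i j : Int) (hK : 1 ≤ K) (hi : 0 ≤ i) (hj : 0 ≤ j) :
    countB A K m i j = pvS A m (i+K-1) (j+K-1) - pvS A m (i-1) (j+K-1)
      - pvS A m (i+K-1) (j-1) + pvS A m (i-1) (j-1) := by
  have hrow : ∀ a : Int, ((PySem.List.pyRange j (j+K)).map (fun b => if pvGetM A a b ≤ m then (1:Int) else 0)).sum
      = pvRowS A m a (j+K-1) - pvRowS A m a (j-1) := by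
    intro a
    have e1 : pvRowS A m a (j+K-1) = ((PySem.List.pyRange 0 (j+K)).map (fun b => if pvGetM A a b ≤ m then (1:Int) else 0)).sum := by
      unfold pvRowS pvF
      rw [show j + K - 1 + 1 = j + K by omega]
    have e2 : pvRowS A m a (j-1) = ((PySem.List.pyRange 0 j).map (fun b => if pvGetM A a b ≤ m then (1:Int) else 0)).sum := by
      unfold pvRowS pvF
      rw [show j - 1 + 1 = j by omega]
    rw [e1, e2, PySem.List.pyRange_one_append 0 j (j+K) (by omega) (by omega),
      List.map_append, List.sum_append]
    omega
  have hcol : ∀ c : Int, ((PySem.List.pyRange i (i+K)).map (fun a => pvRowS A m a c)).sum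
      = pvS A m (i+K-1) c - pvS A m (i-1) c := by
    intro c
    have e1 : pvS A m (i+K-1) c = ((PySem.List.pyRange 0 (i+K)).map (fun a => pvRowS A m a c)).sum := by
      unfold pvS
      rw [show i + K - 1 + 1 = i + K by omega]
    have e2 : pvS A m (i-1) c = ((PySem.List.pyRange 0 i).map (fun a => pvRowS A m a c)).sum := by
      unfold pvS
      rw [show i - 1 + 1 = i by omega]
    rw [e1, e2, PySem.List.pyRange_one_append 0 i (i+K) (by omega) (by omega),
      List.map_append, List.sum_append]
    omega
  unfold countB
  simp only [hrow]
  rw [pv_sum_map_sub, hcol (j+K-1), hcol (j-1)]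
  omega

-- dp matrix shape
def pvShp (n : ℕ) (d : List (List Int)) : Prop := d.length = n ∧ ∀ r ∈ d, r.length = n

lemma shp_replicate (n : ℕ) : pvShp n (List.replicate n (List.replicate n (0:Int))) := by
  constructor
  · simp
  · intro r hr
    rw [List.eq_of_mem_replicate hr]
    simp

lemma getM_setM {n : ℕ} {d : List (List Int)} (hs : pvShp n d) (a b : ℕ) (ha : a < n) (hb : b < n)
    (v : Int) (p q : ℕ) :
    pvGetM (pvSetM d (a:Int) (b:Int) v) (p:Int) (q:Int) = if p = a ∧ q = b then v else pvGetM d (p:Int) (q:Int) := by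
  have haL : a < d.length := by rw [hs.1]; omega
  have hrow : PySem.List.pyGetD d (a:Int) [] ∈ d :=
    PySem.List.pyGetD_mem d [] (by constructor <;> [omega; exact_mod_cast haL])
  have hbL : b < (PySem.List.pyGetD d (a:Int) []).length := by rw [hs.2 _ hrow]; omega
  unfold pvSetM pvGetM
  rw [PySem.List.pyGetD_pySetD_natCast d a p _ [] haL]
  by_cases hpa : p = a
  · subst hpa
    simp only [if_true, true_and]
    rw [PySem.List.pyGetD_pySetD_natCast _ b q _ 0 hbL]
  · simp [hpa]

lemma setM_shape {n : ℕ} {d : List (List Int)} (hs : pvShp n d) (a b : ℕ) (ha : a < n) (v : Int) :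
    pvShp n (pvSetM d (a:Int) (b:Int) v) := by
  unfold pvSetM
  constructor
  · rw [PySem.List.length_pySetD]; exact hs.1
  · intro r hr
    rw [PySem.List.pySetD_of_nonneg _ _ (by omega : (0:Int) ≤ (a:Int))] at hr
    rcases List.mem_or_eq_of_mem_set hr with h | h
    · exact hs.2 _ h
    · subst h
      rw [PySem.List.length_pySetD]
      have ha' : a < d.length := by rw [hs.1]; omega
      exact hs.2 _ (PySem.List.pyGetD_mem d [] (by constructor <;> [omega; exact_mod_cast ha']))

lemma getM_setM' {n : ℕ} {d : List (List Int)} (hs : pvShp n d) {a b : Int} (ha : 0 ≤ a)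
    (han : a < (n:Int)) (hb : 0 ≤ b) (hbn : b < (n:Int)) (v : Int) {p q : Int} (hp : 0 ≤ p) (hq : 0 ≤ q) :
    pvGetM (pvSetM d a b v) p q = if p = a ∧ q = b then v else pvGetM d p q := by
  lift a to ℕ using ha; lift b to ℕ using hb; lift p to ℕ using hp; lift q to ℕ using hq
  rw [getM_setM hs a b (by exact_mod_cast han) (by exact_mod_cast hbn) v p q]
  by_cases h1 : p = a <;> by_cases h2 : q = b <;> simp [h1, h2]

lemma setM_shape' {n : ℕ} {d : List (List Int)} (hs : pvShp n d) {a : Int} (ha : 0 ≤ a)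
    (han : a < (n:Int)) {b : Int} (hb : 0 ≤ b) (v : Int) : pvShp n (pvSetM d a b v) := by
  lift a to ℕ using ha; lift b to ℕ using hb
  exact setM_shape hs a b (by exact_mod_cast han) v

-- the three dp-filling stages as functions of the loop bound (st· A m d N is the stage in fillA)
def st1 (A : List (List Int)) (m : Int) (d : List (List Int)) (i : Int) : List (List Int) :=
  (PySem.List.pyRange 1 i).foldl (topStep A m) (pvSetM d 0 0 (if pvGetM A 0 0 ≤ m then 1 else 0))

def st2 (A : List (List Int)) (m : Int) (e : List (List Int)) (i : Int) : List (List Int) :=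
  (PySem.List.pyRange 1 i).foldl (colStep A m) e

def st3row (A : List (List Int)) (m i : Int) (e : List (List Int)) (j : Int) : List (List Int) :=
  (PySem.List.pyRange 1 j).foldl (cellStep A m i) e

def st3 (A : List (List Int)) (m N : Int) (e : List (List Int)) (i : Int) : List (List Int) :=
  (PySem.List.pyRange 1 i).foldl (fun e i => (PySem.List.pyRange 1 N).foldl (cellStep A m i) e) e

lemma stage1 (A : List (List Int)) (m : Int) {n : ℕ} (hn : 0 < n) {d : List (List Int)}
    (hs : pvShp n d) : ∀ k : ℕ, k < n →
      pvShp n (st1 A m d (1 + (k:Int)))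
      ∧ (∀ b : Int, 0 ≤ b → b ≤ (k:Int) → pvGetM (st1 A m d (1 + (k:Int))) 0 b = pvS A m 0 b)
      ∧ (∀ p q : Int, 0 < p → 0 ≤ q → pvGetM (st1 A m d (1 + (k:Int))) p q = pvGetM d p q) := by
  intro k
  induction k with
  | zero =>
    intro hk
    unfold st1
    rw [PySem.List.pyRange_one_eq_nil (by simp), List.foldl_nil]
    have hn' : (0:Int) < (n:Int) := by exact_mod_cast hn
    refine ⟨setM_shape' hs le_rfl hn' le_rfl _, ?_, ?_⟩
    · intro b hb0 hb1
      have hb : b = 0 := by omega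
      subst hb
      rw [getM_setM' hs le_rfl hn' le_rfl hn' _ le_rfl le_rfl, if_pos ⟨rfl, rfl⟩,
        pvS_zero, pvRowS_zero]
      rfl
    · intro p q hp hq
      rw [getM_setM' hs le_rfl hn' le_rfl hn' _ (by omega) hq, if_neg (by omega)]
  | succ t ih =>
    intro hk
    have ht := ih (by omega)
    have hsplit : PySem.List.pyRange 1 (1 + ((t+1:ℕ):Int))
        = PySem.List.pyRange 1 (1 + (t:Int)) ++ [1 + (t:Int)] := by
      push_cast
      rw [show (1:Int) + ((t:Int) + 1) = (1 + (t:Int)) + 1 by ring]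
      exact PySem.List.pyRange_one_succ_right (by omega)
    unfold st1 at ht ⊢
    rw [hsplit, List.foldl_append, List.foldl_cons, List.foldl_nil]
    obtain ⟨hsD, hrowD, hkeepD⟩ := ht
    rw [topStep]
    have htn : (1:Int) + (t:Int) < (n:Int) := by push_cast at hk ⊢; omega
    have hval : pvGetM ((PySem.List.pyRange 1 (1 + (t:Int))).foldl (topStep A m)
        (pvSetM d 0 0 (if pvGetM A 0 0 ≤ m then 1 else 0))) 0 (1 + (t:Int) - 1) = pvS A m 0 (t:Int) := by
      rw [show (1:Int) + (t:Int) - 1 = (t:Int) by ring]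
      exact hrowD _ (by omega) le_rfl
    have hSstep : pvS A m 0 (1 + (t:Int)) = pvS A m 0 (t:Int) + pvF A m 0 (1 + (t:Int)) := by
      rw [pvS_zero, pvS_zero, pvRowS_succ A m 0 (by omega : (0:Int) ≤ 1 + (t:Int)),
        show (1:Int) + (t:Int) - 1 = (t:Int) by ring]
    have hn' : (0:Int) < (n:Int) := by exact_mod_cast hn
    refine ⟨setM_shape' hsD le_rfl hn' (by omega) _, ?_, ?_⟩
    · intro b hb0 hb1
      rw [getM_setM' hsD le_rfl hn' (by omega) htn _ le_rfl hb0]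
      by_cases hbt : b = 1 + (t:Int)
      · rw [if_pos ⟨rfl, hbt⟩, hval, hbt, hSstep]
        rfl
      · rw [if_neg (by tauto)]
        exact hrowD b hb0 (by push_cast at hb1; omega)
    · intro p q hp hq
      rw [getM_setM' hsD le_rfl hn' (by omega) htn _ (by omega) hq, if_neg (by omega)]
      exact hkeepD p q hp hq

lemma stage2 (A : List (List Int)) (m : Int) {n : ℕ} (hn : 0 < n) {e : List (List Int)}
    (hs : pvShp n e) (h00 : pvGetM e 0 0 = pvS A m 0 0) : ∀ k : ℕ, k < n →
      pvShp n (st2 A m e (1 + (k:Int)))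
      ∧ (∀ a : Int, 0 ≤ a → a ≤ (k:Int) → pvGetM (st2 A m e (1 + (k:Int))) a 0 = pvS A m a 0)
      ∧ (∀ p q : Int, 0 ≤ p → 0 < q → pvGetM (st2 A m e (1 + (k:Int))) p q = pvGetM e p q)
      ∧ (∀ q : Int, 0 ≤ q → pvGetM (st2 A m e (1 + (k:Int))) 0 q = pvGetM e 0 q) := by
  intro k
  induction k with
  | zero =>
    intro hk
    unfold st2
    rw [PySem.List.pyRange_one_eq_nil (by simp), List.foldl_nil]
    exact ⟨hs, fun a ha0 ha1 => by rw [show a = 0 by omega]; exact h00,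
      fun p q _ _ => rfl, fun q _ => rfl⟩
  | succ t ih =>
    intro hk
    have ht := ih (by omega)
    have hsplit : PySem.List.pyRange 1 (1 + ((t+1:ℕ):Int))
        = PySem.List.pyRange 1 (1 + (t:Int)) ++ [1 + (t:Int)] := by
      push_cast
      rw [show (1:Int) + ((t:Int) + 1) = (1 + (t:Int)) + 1 by ring]
      exact PySem.List.pyRange_one_succ_right (by omega)
    unfold st2 at ht ⊢
    rw [hsplit, List.foldl_append, List.foldl_cons, List.foldl_nil]
    obtain ⟨hsD, hcolD, hkeepD, hrow0D⟩ := ht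
    rw [colStep]
    have htn : (1:Int) + (t:Int) < (n:Int) := by push_cast at hk; omega
    have hval : pvGetM (List.foldl (colStep A m) e (PySem.List.pyRange 1 (1 + (t:Int))))
        (1 + (t:Int) - 1) 0 = pvS A m (t:Int) 0 := by
      rw [show (1:Int) + (t:Int) - 1 = (t:Int) by ring]
      exact hcolD _ (by omega) le_rfl
    have hSstep : pvS A m (1 + (t:Int)) 0 = pvS A m (t:Int) 0 + pvF A m (1 + (t:Int)) 0 := by
      rw [pvS_succ A m 0 (by omega : (0:Int) ≤ 1 + (t:Int)),
        show (1:Int) + (t:Int) - 1 = (t:Int) by ring, pvRowS_zero]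
    have hn' : (0:Int) < (n:Int) := by exact_mod_cast hn
    refine ⟨setM_shape' hsD (by omega) htn le_rfl _, ?_, ?_, ?_⟩
    · intro a ha0 ha1
      rw [getM_setM' hsD (by omega) htn le_rfl hn' _ ha0 le_rfl]
      by_cases hat : a = 1 + (t:Int)
      · rw [if_pos ⟨hat, rfl⟩, hval, hat, hSstep]
        rfl
      · rw [if_neg (by tauto)]
        exact hcolD a ha0 (by push_cast at ha1; omega)
    · intro p q hp hq
      rw [getM_setM' hsD (by omega) htn le_rfl hn' _ hp (by omega), if_neg (by omega)]
      exact hkeepD p q hp hq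
    · intro q hq
      rw [getM_setM' hsD (by omega) htn le_rfl hn' _ le_rfl hq, if_neg (by omega)]
      exact hrow0D q hq

lemma stage3row (A : List (List Int)) (m : Int) {n : ℕ} (hn : 0 < n) {e : List (List Int)}
    (hs : pvShp n e) {i : Int} (hi1 : 1 ≤ i) (hin : i < (n:Int))
    (hprev : ∀ b : Int, 0 ≤ b → b < (n:Int) → pvGetM e (i-1) b = pvS A m (i-1) b)
    (h0 : pvGetM e i 0 = pvS A m i 0) : ∀ k : ℕ, k < n →
      pvShp n (st3row A m i e (1 + (k:Int)))
      ∧ (∀ b : Int, 0 ≤ b → b ≤ (k:Int) → pvGetM (st3row A m i e (1 + (k:Int))) i b = pvS A m i b)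
      ∧ (∀ p q : Int, 0 ≤ p → 0 ≤ q → p ≠ i → pvGetM (st3row A m i e (1 + (k:Int))) p q = pvGetM e p q) := by
  intro k
  induction k with
  | zero =>
    intro hk
    unfold st3row
    rw [PySem.List.pyRange_one_eq_nil (by simp), List.foldl_nil]
    exact ⟨hs, fun b hb0 hb1 => by rw [show b = 0 by omega]; exact h0, fun p q _ _ _ => rfl⟩
  | succ t ih =>
    intro hk
    have ht := ih (by omega)
    have hsplit : PySem.List.pyRange 1 (1 + ((t+1:ℕ):Int))
        = PySem.List.pyRange 1 (1 + (t:Int)) ++ [1 + (t:Int)] := by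
      push_cast
      rw [show (1:Int) + ((t:Int) + 1) = (1 + (t:Int)) + 1 by ring]
      exact PySem.List.pyRange_one_succ_right (by omega)
    unfold st3row at ht ⊢
    rw [hsplit, List.foldl_append, List.foldl_cons, List.foldl_nil]
    obtain ⟨hsD, hrowD, hkeepD⟩ := ht
    rw [cellStep]
    have htn : (1:Int) + (t:Int) < (n:Int) := by push_cast at hk; omega
    set D := List.foldl (cellStep A m i) e (PySem.List.pyRange 1 (1 + (t:Int))) with hD
    have hv1 : pvGetM D (i-1) (1 + (t:Int)) = pvS A m (i-1) (1 + (t:Int)) := by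
      rw [hkeepD _ _ (by omega) (by omega) (by omega)]
      exact hprev _ (by omega) htn
    have hv2 : pvGetM D i (1 + (t:Int) - 1) = pvS A m i (t:Int) := by
      rw [show (1:Int) + (t:Int) - 1 = (t:Int) by ring]
      exact hrowD _ (by omega) le_rfl
    have hv3 : pvGetM D (i-1) (1 + (t:Int) - 1) = pvS A m (i-1) (t:Int) := by
      rw [show (1:Int) + (t:Int) - 1 = (t:Int) by ring, hkeepD _ _ (by omega) (by omega) (by omega)]
      exact hprev _ (by omega) (by omega)
    have hSstep : pvS A m i (1 + (t:Int)) = pvF A m i (1 + (t:Int)) + pvS A m (i-1) (1 + (t:Int))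
        + pvS A m i (t:Int) - pvS A m (i-1) (t:Int) := by
      have := pvS_rec A m (by omega : (0:Int) ≤ i) (by omega : (0:Int) ≤ 1 + (t:Int))
      rw [show (1:Int) + (t:Int) - 1 = (t:Int) by ring] at this
      omega
    refine ⟨setM_shape' hsD (by omega) hin (by omega) _, ?_, ?_⟩
    · intro b hb0 hb1
      rw [getM_setM' hsD (by omega) hin (by omega) htn _ (by omega) hb0]
      by_cases hbt : b = 1 + (t:Int)
      · rw [if_pos ⟨rfl, hbt⟩, hv1, hv2, hv3, hbt, hSstep]
        rfl
      · rw [if_neg (by tauto)]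
        exact hrowD b hb0 (by push_cast at hb1; omega)
    · intro p q hp hq hpi
      rw [getM_setM' hsD (by omega) hin (by omega) htn _ hp hq, if_neg (by tauto)]
      exact hkeepD p q hp hq hpi

lemma stage3 (A : List (List Int)) (m N : Int) {n : ℕ} (hN : N = (n:Int)) (hn : 0 < n)
    {e : List (List Int)} (hs : pvShp n e)
    (hrow0 : ∀ b : Int, 0 ≤ b → b < (n:Int) → pvGetM e 0 b = pvS A m 0 b)
    (hcol0 : ∀ a : Int, 0 ≤ a → a < (n:Int) → pvGetM e a 0 = pvS A m a 0) : ∀ k : ℕ, k < n →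
      pvShp n (st3 A m N e (1 + (k:Int)))
      ∧ (∀ a b : Int, 0 ≤ a → a ≤ (k:Int) → 0 ≤ b → b < (n:Int) →
          pvGetM (st3 A m N e (1 + (k:Int))) a b = pvS A m a b)
      ∧ (∀ a : Int, 0 ≤ a → a < (n:Int) → pvGetM (st3 A m N e (1 + (k:Int))) a 0 = pvS A m a 0) := by
  intro k
  induction k with
  | zero =>
    intro hk
    unfold st3
    rw [show PySem.List.pyRange 1 (1 + ((0:ℕ):Int)) = [] from PySem.List.pyRange_one_eq_nil (by simp),
      List.foldl_nil]
    exact ⟨hs, fun a b ha0 ha1 hb0 hb1 => by rw [show a = 0 by omega]; exact hrow0 b hb0 hb1, hcol0⟩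
  | succ t ih =>
    intro hk
    have ht := ih (by omega)
    have hsplit : PySem.List.pyRange 1 (1 + ((t+1:ℕ):Int))
        = PySem.List.pyRange 1 (1 + (t:Int)) ++ [1 + (t:Int)] := by
      push_cast
      rw [show (1:Int) + ((t:Int) + 1) = (1 + (t:Int)) + 1 by ring]
      exact PySem.List.pyRange_one_succ_right (by omega)
    unfold st3 at ht ⊢
    rw [hsplit, List.foldl_append, List.foldl_cons, List.foldl_nil]
    obtain ⟨hsD, hallD, hcolD⟩ := ht
    have htn : (1:Int) + (t:Int) < (n:Int) := by push_cast at hk ⊢; omega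
    set D := List.foldl (fun e i => (PySem.List.pyRange 1 N).foldl (cellStep A m i) e) e
      (PySem.List.pyRange 1 (1 + (t:Int))) with hD
    -- the new outer step is the inner row loop on row 1+t
    have hrow := stage3row A m hn hsD (i := 1 + (t:Int)) (by omega) htn
      (by
        intro b hb0 hb1
        rw [show (1:Int) + (t:Int) - 1 = (t:Int) by ring]
        exact hallD _ b (by omega) le_rfl hb0 hb1)
      (hcolD _ (by omega) htn)
      (n-1) (by omega)
    have hbnd : (1 + ((n-1:ℕ):Int)) = N := by push_cast; omega
    rw [hbnd] at hrow
    have hstrow : st3row A m (1 + (t:Int)) D N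
        = (PySem.List.pyRange 1 N).foldl (cellStep A m (1 + (t:Int))) D := rfl
    rw [hstrow] at hrow
    obtain ⟨hsE, hrowE, hkeepE⟩ := hrow
    refine ⟨hsE, ?_, ?_⟩
    · intro a b ha0 ha1 hb0 hb1
      by_cases hat : a = 1 + (t:Int)
      · subst hat
        exact hrowE b hb0 (by push_cast; omega)
      · rw [hkeepE a b ha0 hb0 hat]
        exact hallD a b ha0 (by push_cast at ha1 ⊢; omega) hb0 hb1
    · intro a ha0 ha1
      by_cases hat : a = 1 + (t:Int)
      · subst hat
        exact hrowE 0 le_rfl (by push_cast; omega)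
      · rw [hkeepE a 0 ha0 le_rfl hat]
        exact hcolD a ha0 ha1

lemma fillA_correct (A : List (List Int)) (N m : Int) (d : List (List Int)) {n : ℕ}
    (hN : N = (n:Int)) (hn : 0 < n) (hs : pvShp n d) :
    pvShp n (fillA A N m d)
    ∧ ∀ p q : Int, 0 ≤ p → p < (n:Int) → 0 ≤ q → q < (n:Int) →
        pvGetM (fillA A N m d) p q = pvS A m p q := by
  have hbnd : (1 + ((n-1:ℕ):Int)) = N := by push_cast; omega
  have h1 := stage1 A m hn hs (n-1) (by omega)
  rw [hbnd] at h1
  obtain ⟨hs1, hrow1, _⟩ := h1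
  have h2 := stage2 A m hn hs1 (hrow1 0 le_rfl (by positivity)) (n-1) (by omega)
  rw [hbnd] at h2
  obtain ⟨hs2, hcol2, _, hrow02⟩ := h2
  have hcol2' : ∀ a : Int, 0 ≤ a → a < (n:Int) → pvGetM (st2 A m (st1 A m d N) N) a 0 = pvS A m a 0 :=
    fun a ha0 ha1 => hcol2 a ha0 (by push_cast; omega)
  have h3 := stage3 A m N hN hn hs2
    (fun b hb0 hb1 => by rw [hrow02 b hb0]; exact hrow1 b hb0 (by push_cast; omega))
    hcol2' (n-1) (by omega)
  rw [hbnd] at h3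
  obtain ⟨hs3, hall3, _⟩ := h3
  constructor
  · exact hs3
  · intro p q hp0 hp1 hq0 hq1
    exact hall3 p q hp0 (by push_cast; omega) hq0 hq1

-- a fold with Python's `break` pattern is `any`
lemma break_fold (p : Int → Bool) (xs : List Int) (b : Bool) :
    xs.foldl (fun g x => if g then g else p x) b = (b || xs.any p) := by
  rw [PySem.List.foldl_congr_mem xs _ (fun g x => if p x then true else g) b
    (by intro acc x _; cases acc <;> cases hpx : p x <;> simp [hpx])]
  exact PySem.List.foldl_if_true_eq p xs b

lemma goodA_any (N K lim : Int) (d : List (List Int)) :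
    goodA N K lim d = (PySem.List.pyRange 0 (N-K+1)).any (fun i =>
      (PySem.List.pyRange 0 (N-K+1)).any (fun j =>
        decide (pvGetM d (i+K-1) (j+K-1)
          - (if i = 0 then 0 else pvGetM d (i-1) (j+K-1))
          - (if j = 0 then 0 else pvGetM d (i+K-1) (j-1))
          + (if i = 0 ∨ j = 0 then 0 else pvGetM d (i-1) (j-1)) ≥ lim))) := by
  unfold goodA
  rw [PySem.List.foldl_congr_mem _ _
    (fun g i => if (PySem.List.pyRange 0 (N-K+1)).any (fun j =>
      decide (pvGetM d (i+K-1) (j+K-1)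
        - (if i = 0 then 0 else pvGetM d (i-1) (j+K-1))
        - (if j = 0 then 0 else pvGetM d (i+K-1) (j-1))
        + (if i = 0 ∨ j = 0 then 0 else pvGetM d (i-1) (j-1)) ≥ lim)) then true else g)
    false ?_]
  · rw [PySem.List.foldl_if_true_eq]
    simp only [Bool.false_or]
  · intro acc i _
    rw [break_fold]
    cases acc <;> simp

lemma good_eq (A : List (List Int)) (N K lim m : Int) {n : ℕ} (hN : N = (n:Int)) (hn : 0 < n)
    (hK : 1 ≤ K) {d : List (List Int)} (hs : pvShp n d) :
    goodA N K lim (fillA A N m d) = goodB N K lim A m := by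
  obtain ⟨_, hget⟩ := fillA_correct A N m d hN hn hs
  rw [goodA_any]
  unfold goodB
  · apply PySem.List.any_congr_mem
    intro i hi
    apply PySem.List.any_congr_mem
    intro j hj
    obtain ⟨hi0, hi1⟩ := PySem.List.mem_pyRange_one.mp hi
    obtain ⟨hj0, hj1⟩ := PySem.List.mem_pyRange_one.mp hj
    have hik0 : (0:Int) ≤ i + K - 1 := by omega
    have hik1 : i + K - 1 < (n:Int) := by omega
    have hjk0 : (0:Int) ≤ j + K - 1 := by omega
    have hjk1 : j + K - 1 < (n:Int) := by omega
    have e1 : pvGetM (fillA A N m d) (i+K-1) (j+K-1) = pvS A m (i+K-1) (j+K-1) :=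
      hget _ _ hik0 hik1 hjk0 hjk1
    have e2 : (if i = 0 then 0 else pvGetM (fillA A N m d) (i-1) (j+K-1)) = pvS A m (i-1) (j+K-1) := by
      by_cases hi' : i = 0
      · rw [if_pos hi', pvS_neg A m _ (by omega)]
      · rw [if_neg hi', hget _ _ (by omega) (by omega) hjk0 hjk1]
    have e3 : (if j = 0 then 0 else pvGetM (fillA A N m d) (i+K-1) (j-1)) = pvS A m (i+K-1) (j-1) := by
      by_cases hj' : j = 0
      · rw [if_pos hj', pvS_colneg A m _ (by omega : (j:Int) - 1 < 0)]
      · rw [if_neg hj', hget _ _ hik0 hik1 (by omega) (by omega)]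
    have e4 : (if i = 0 ∨ j = 0 then 0 else pvGetM (fillA A N m d) (i-1) (j-1)) = pvS A m (i-1) (j-1) := by
      by_cases hi' : i = 0
      · rw [if_pos (Or.inl hi'), pvS_neg A m _ (by omega)]
      · by_cases hj' : j = 0
        · rw [if_pos (Or.inr hj'), pvS_colneg A m _ (by omega : (j:Int) - 1 < 0)]
        · rw [if_neg (by tauto), hget _ _ (by omega) (by omega) (by omega) (by omega)]
    rw [e1, e2, e3, e4, ← countB_eq A K m i j hK hi0 hj0]

lemma pv_lim_eq (K : Int) :
    PySem.Int.floordiv (K*K) 2 + (if PySem.Int.mod K 2 = 0 then (0:Int) else 1)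
      = PySem.Int.floordiv (K*K + 1) 2 := by
  rw [PySem.Int.floordiv_eq_ediv_of_pos (by norm_num : (0:Int) < 2),
    PySem.Int.floordiv_eq_ediv_of_pos (by norm_num : (0:Int) < 2),
    PySem.Int.mod_eq_emod_of_pos (by norm_num : (0:Int) < 2)]
  rcases Int.even_or_odd K with ⟨t, ht⟩ | ⟨t, ht⟩
  · have hKK : K * K = 2 * (2 * (t * t)) := by rw [ht]; ring
    have hK2 : K % 2 = 0 := by omega
    rw [hKK, if_pos hK2]
    omega
  · have hKK : K * K = 2 * (2 * (t * t) + 2 * t) + 1 := by rw [ht]; ring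
    have hK2 : K % 2 ≠ 0 := by omega
    rw [hKK, if_neg hK2]
    omega

lemma pvS_nonneg (A : List (List Int)) (m i j : Int) : 0 ≤ pvS A m i j := by
  unfold pvS
  apply List.sum_nonneg
  intro x hx
  obtain ⟨a, _, rfl⟩ := List.mem_map.mp hx
  unfold pvRowS
  apply List.sum_nonneg
  intro y hy
  obtain ⟨b, _, rfl⟩ := List.mem_map.mp hy
  unfold pvF
  split <;> norm_num

-- for K = 0 every window test succeeds on both sides (lim = 0 and the empty-window count is 0;
-- A reads dp[-1][-1] ≥ 0 through Python's negative-index wraparound)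
lemma good_eq_zero (A : List (List Int)) (N lim m : Int) {n : ℕ} (hN : N = (n:Int)) (hn : 0 < n)
    (hlim : lim ≤ 0) {d : List (List Int)} (hs : pvShp n d) :
    goodA N 0 lim (fillA A N m d) = true ∧ goodB N 0 lim A m = true := by
  obtain ⟨⟨hlen, hrows⟩, hget⟩ := fillA_correct A N m d hN hn hs
  have h0mem : (0:Int) ∈ PySem.List.pyRange 0 (N-0+1) := PySem.List.mem_pyRange_one.mpr ⟨le_rfl, by omega⟩
  constructor
  · rw [goodA_any]
    apply List.any_eq_true.mpr
    refine ⟨0, h0mem, ?_⟩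
    apply List.any_eq_true.mpr
    refine ⟨0, h0mem, ?_⟩
    rw [decide_eq_true_eq]
    norm_num
    -- pvGetM dp (-1) (-1) is the bottom-right prefix count, which is ≥ 0
    have hdne : fillA A N m d ≠ [] := by
      intro hcon
      rw [hcon] at hlen
      simp at hlen
      omega
    have hlast : PySem.List.pyGetD (fillA A N m d) (-1) [] = (fillA A N m d)[(fillA A N m d).length - 1] := by
      rw [PySem.List.pyGetD_neg_one _ _ hdne]
      exact List.getLast_eq_getElem hdne
    have hrne : (fillA A N m d)[(fillA A N m d).length - 1] ≠ [] := by
      have hm : (fillA A N m d)[(fillA A N m d).length - 1] ∈ fillA A N m d := List.getElem_mem _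
      have := hrows _ hm
      intro hcon
      rw [hcon] at this
      simp at this
      omega
    have hval : pvGetM (fillA A N m d) (-1) (-1)
        = pvGetM (fillA A N m d) ((n:Int) - 1) ((n:Int) - 1) := by
      have h1 : ((n:Int) - 1) = ((n - 1 : ℕ) : Int) := by omega
      unfold pvGetM
      rw [hlast, PySem.List.pyGetD_neg_one _ _ hrne, List.getLast_eq_getElem hrne, h1,
        PySem.List.pyGetD_natCast]
      have hget1 : (fillA A N m d).getD (n-1) [] = (fillA A N m d)[(fillA A N m d).length - 1] := by
        rw [List.getD_eq_getElem _ _ (by omega : (n-1:ℕ) < (fillA A N m d).length)]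
        congr 1
        omega
      simp only [PySem.List.pyGetD_natCast]
      rw [hget1]
      rw [List.getD_eq_getElem _ _ (by
        rw [hrows _ (List.getElem_mem _)]
        omega)]
      congr 1
      rw [hrows _ (List.getElem_mem _)]
    rw [hval, hget _ _ (by omega) (by omega) (by omega) (by omega)]
    have := pvS_nonneg A m ((n:Int)-1) ((n:Int)-1)
    omega
  · unfold goodB
    apply List.any_eq_true.mpr
    refine ⟨0, h0mem, ?_⟩
    apply List.any_eq_true.mpr
    refine ⟨0, h0mem, ?_⟩
    have hc : countB A 0 m 0 0 = 0 := by
      unfold countB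
      rw [show (0:Int)+0 = 0 from rfl, PySem.List.pyRange_one_eq_nil le_rfl]
      rfl
    simp only [hc, ge_iff_le, decide_eq_true_eq]
    omega

lemma loop_eq (N K lim : Int) (A : List (List Int)) {n : ℕ} (hN : N = (n:Int)) (hn : 0 < n)
    (hK : 0 ≤ K) (hlim : lim = PySem.Int.floordiv (K*K + 1) 2) :
    ∀ (fuel : ℕ) (l u : Int) (d : List (List Int)), (u - l).toNat ≤ fuel →
      pvShp n d → loopA N K lim A d l u = loopB N K lim A l u := by
  intro fuel
  induction fuel with
  | zero =>
    intro l u d hf _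
    rw [loopA, loopB, dif_neg (by omega), dif_neg (by omega)]
  | succ f ih =>
    intro l u d hf hs
    rw [loopA, loopB]
    by_cases h : 1 < u - l
    · rw [dif_pos h, dif_pos h]
      simp only []
      have hm : l < PySem.Int.floordiv (u + l) 2 ∧ PySem.Int.floordiv (u + l) 2 < u := by
        rw [PySem.Int.floordiv_eq_ediv_of_pos (by norm_num : (0:Int) < 2)]
        omega
      by_cases hK1 : 1 ≤ K
      · rw [good_eq A N K lim _ hN hn hK1 hs]
        by_cases hg : goodB N K lim A (PySem.Int.floordiv (u + l) 2)
        · rw [if_pos hg, if_pos hg]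
          exact ih l _ _ (by omega) (fillA_correct A N _ d hN hn hs).1
        · rw [if_neg hg, if_neg hg]
          exact ih _ u _ (by omega) (fillA_correct A N _ d hN hn hs).1
      · have hK0 : K = 0 := by omega
        subst hK0
        have hlim0 : lim ≤ 0 := by
          rw [hlim]
          decide
        obtain ⟨hga, hgb⟩ := good_eq_zero A N lim _ hN hn hlim0 hs
        rw [hga, hgb, if_pos rfl, if_pos rfl]
        exact ih l _ _ (by omega) (fillA_correct A N _ d hN hn hs).1
    · rw [dif_neg h, dif_neg h]

-- ===== VERDICT (by name: the statement is the Claim_ definition above) =====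
theorem solve_spec : Claim_equal_solve := by
  intro N K A _ hPre
  obtain ⟨hK, hN1, hlen, hrow⟩ := hPre
  unfold Spec_solve solve solve_alt
  have hN : N = ((N.toNat : ℕ) : Int) := by omega
  have hn : 0 < N.toNat := by omega
  simp only []
  rw [pv_lim_eq]
  exact loop_eq N K _ A hN hn hK rfl _ _ _ _ le_rfl (shp_replicate N.toNat)
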